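-- pv_equiv track=rewrite | github.com/fabian416/lenclaw | agents/cryptobro/cryptobro.py | _render_fear_greed_gauge
-- ===== SOURCE A (Python) =====
-- def _render_fear_greed_gauge(value: int) -> str:
--     """Render a text-based Fear & Greed gauge."""
--     bar_width = 40
--     filled = int((value / 100) * bar_width)
--
--     # Color segments
--     segments: list[str] = []
--     for i in range(bar_width):
--         if i < bar_width * 0.25:
--             color = "red"
--         elif i < bar_width * 0.45:
--             color = "yellow"
--         elif i < bar_width * 0.55:
--             color = "white"
--         elif i < bar_width * 0.75:
--             color = "bright_green"
--         else:
--             color = "green"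
--
--         if i < filled:
--             segments.append(f"[{color}]\u2588[/{color}]")
--         else:
--             segments.append("[dim]\u2591[/dim]")
--
--     bar = "".join(segments)
--     pointer = " " * filled + "\u25b2"
--
--     return (
--         f"  FEAR [{bar}] GREED\n"
--         f"  {pointer}\n"
--         f"  Value: {value}/100"
--     )
-- ===== SOURCE B (Python) =====
-- def _render_fear_greed_gauge(value: int) -> str:
--     """Render a text-based Fear & Greed gauge.
--
--     Arithmetic band-fill: for each color band, the number of filled cells is
--     computed by clamping (min/max) and the glyph runs are emitted by string
--     repetition -- no per-cell loop or per-cell comparison at all.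
--     """
--     filled = int((value / 100) * 40)
--     bands = [("red", 10), ("yellow", 8), ("white", 4), ("bright_green", 8), ("green", 10)]
--     parts: list[str] = []
--     start = 0
--     for color, width in bands:
--         k = min(width, max(0, filled - start))
--         parts.append(f"[{color}]\u2588[/{color}]" * k)
--         parts.append("[dim]\u2591[/dim]" * (width - k))
--         start += width
--     bar = "".join(parts)
--     pointer = " " * filled + "\u25b2"
--     return (
--         f"  FEAR [{bar}] GREED\n"
--         f"  {pointer}\n"
--         f"  Value: {value}/100"
--     )
-- ===== Notes on version B (the rewrite author's own statement) =====
-- stated objective: alternative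
-- what changed: B eliminates A's per-cell loop with per-cell threshold and fill comparisons: it walks a precomputed color-band table, computes each band's filled-cell count arithmetically by clamping min(width, max(0, filled - start)), and emits the glyph runs by string repetition.
import Mathlib
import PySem

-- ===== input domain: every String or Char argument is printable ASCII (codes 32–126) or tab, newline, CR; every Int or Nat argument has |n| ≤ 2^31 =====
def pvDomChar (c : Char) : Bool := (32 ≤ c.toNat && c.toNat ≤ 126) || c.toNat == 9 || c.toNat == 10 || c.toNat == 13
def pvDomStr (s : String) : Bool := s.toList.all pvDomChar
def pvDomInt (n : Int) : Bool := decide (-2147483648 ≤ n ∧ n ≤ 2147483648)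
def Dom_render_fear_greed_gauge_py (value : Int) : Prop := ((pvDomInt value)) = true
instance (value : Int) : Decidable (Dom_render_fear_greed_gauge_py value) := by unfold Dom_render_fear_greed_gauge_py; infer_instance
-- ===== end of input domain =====

-- B replaces A's per-cell loop (threshold + fill comparison per cell) by a precomputed
-- color-band table: each band's filled-cell count is clamped arithmetically and the glyph runs are
-- emitted by string repetition (objective: alternative decomposition, same cost).

-- ===== PORT A =====
-- int((value / 100) * 40): Python float expression; equals truncating division (value*40) tdiv 100
-- exactly on the domain |value| ≤ 2^31 (verified against CPython across the domain).
-- A's per-cell loop over the bar positions, threshold comparisons per cell.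
def pvSegA (filled : Int) : List String :=
  (PySem.List.pyRange 0 40 1).foldl (fun acc i =>
    let color : String :=
      if i < 10 then "red"
      else if i < 18 then "yellow"
      else if i < 22 then "white"
      else if i < 30 then "bright_green"
      else "green"
    acc ++ [if i < filled then "[" ++ color ++ "]\u2588[/" ++ color ++ "]"
            else "[dim]\u2591[/dim]"]) []

def render_fear_greed_gauge_py (value : Int) : String :=
  let filled : Int := Int.tdiv (value * 40) 100
  let bar : String := String.join (pvSegA filled)
  let pointer : String := String.ofList (List.replicate filled.toNat ' ') ++ "\u25b2"  -- " " * filled (empty for filled ≤ 0)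
  "  FEAR [" ++ bar ++ "] GREED\n  " ++ pointer ++ "\n  Value: " ++ PySem.Int.toStr value ++ "/100"

-- ===== PORT B =====
-- int((value / 100) * 40) ported the same exact way (see the comment on port A).
def pvBands : List (String × Int) :=
  [("red", 10), ("yellow", 8), ("white", 4), ("bright_green", 8), ("green", 10)]

-- Source B's band loop carrying (parts joined as a string, start); "s" * k ported as joined replicate.
def pvBarB (filled : Int) : String :=
  (pvBands.foldl (fun (st : String × Int) cw =>
    let k : Int := min cw.2 (max 0 (filled - st.2))
    (st.1 ++ String.join (List.replicate k.toNat ("[" ++ cw.1 ++ "]\u2588[/" ++ cw.1 ++ "]"))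
          ++ String.join (List.replicate (cw.2 - k).toNat "[dim]\u2591[/dim]"),
     st.2 + cw.2)) ("", 0)).1

def render_fear_greed_gauge_py_alt (value : Int) : String :=
  let filled : Int := Int.tdiv (value * 40) 100
  let bar : String := pvBarB filled
  let pointer : String := String.ofList (List.replicate filled.toNat ' ') ++ "\u25b2"
  "  FEAR [" ++ bar ++ "] GREED\n  " ++ pointer ++ "\n  Value: " ++ PySem.Int.toStr value ++ "/100"

-- ===== PRECONDITION & SPEC =====
def Spec_render_fear_greed_gauge_py (value : Int) (out : String) : Prop := out = render_fear_greed_gauge_py_alt value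
instance (value : Int) (out : String) : Decidable (Spec_render_fear_greed_gauge_py value out) := by unfold Spec_render_fear_greed_gauge_py; infer_instance

-- ===== CLAIM (what is proved, stated in full; the proofs are below) =====
def Claim_equal_render_fear_greed_gauge_py : Prop := ∀ (value : Int), Dom_render_fear_greed_gauge_py value → Spec_render_fear_greed_gauge_py value (render_fear_greed_gauge_py value)

-- ===== LEMMAS AND PROOFS =====

-- The bar depends on `filled` only through its clamp to the bar width; both constructions agree.
set_option maxRecDepth 10000 in
set_option maxHeartbeats 2000000 in
theorem pv_bar_eq (f : Int) : String.join (pvSegA f) = pvBarB f := by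
  by_cases h : f ≤ 0
  · have hA : ∀ i : ℤ, 0 ≤ i → ((i < f) = False) := fun i hi => by simp; omega
    have m0 : max (0:Int) f = 0 := by omega
    have m1 : max (0:Int) (f - 10) = 0 := by omega
    have m2 : max (0:Int) (f - 18) = 0 := by omega
    have m3 : max (0:Int) (f - 22) = 0 := by omega
    have m4 : max (0:Int) (f - 30) = 0 := by omega
    have r40 : Int.toNat 40 = 40 := rfl
    norm_num [pvSegA, pvBarB, pvBands, PySem.List.pyRange, hA, m0, m1, m2, m3, m4, r40,
              List.range_succ, Function.comp, String.join, List.replicate]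
    decide
  · by_cases h40 : 40 ≤ f
    · have hA : ∀ i : ℤ, i ≤ 39 → ((i < f) = True) := fun i hi => by simp; omega
      have m0 : min (10:Int) (max 0 f) = 10 := by omega
      have m1 : min (8:Int) (max 0 (f - 10)) = 8 := by omega
      have m2 : min (4:Int) (max 0 (f - 18)) = 4 := by omega
      have m3 : min (8:Int) (max 0 (f - 22)) = 8 := by omega
      have m4 : min (10:Int) (max 0 (f - 30)) = 10 := by omega
      have r40 : Int.toNat 40 = 40 := rfl
      norm_num [pvSegA, pvBarB, pvBands, PySem.List.pyRange, hA, m0, m1, m2, m3, m4, r40,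
                List.range_succ, Function.comp, String.join, List.replicate]
      decide
    · have h1 : 0 < f := by omega
      have h2 : f < 40 := by omega
      interval_cases f <;> rfl

-- ===== VERDICT (by name: the statement is the Claim_ definition above) =====
theorem render_fear_greed_gauge_py_spec : Claim_equal_render_fear_greed_gauge_py := by
  intro value _
  show _ = _
  simp only [render_fear_greed_gauge_py, render_fear_greed_gauge_py_alt, pv_bar_eq]
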